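-- pv_equiv track=rewrite | github.com/ujjwal-kamila/Python-All-Codes | GFG Problems/job_athon_maxValidsibstr.py | modMatch
-- ===== SOURCE A (Python) =====
-- def modMatch(arr, y):
--     # Reduce array elements to last digit only
--     arr = [a % 10 for a in arr]
--
--     # Keep at most 3 occurrences of each digit
--     freq = {}
--     reduced = []
--     for num in arr:
--         if freq.get(num, 0) < 3:
--             reduced.append(num)
--             freq[num] = freq.get(num, 0) + 1
--
--     # Check all triplets
--     n = len(reduced)
--     for i in range(n):
--         for j in range(i + 1, n):
--             for k in range(j + 1, n):
--                 if (reduced[i] * reduced[j] * reduced[k]) % 10 == y: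
--                     return True
--     return False
-- ===== SOURCE B (Python) =====
-- def modMatch(arr, y):
--     # Count last digits once; then search sorted digit triples (d1 <= d2 <= d3)
--     # with multiplicity-aware availability, instead of scanning index triples.
--     digits = [a % 10 for a in arr]
--     cnt = [digits.count(d) for d in range(10)]
--     for d1 in range(10):
--         for d2 in range(d1, 10):
--             for d3 in range(d2, 10):
--                 if (d1 * d2 * d3) % 10 != y:
--                     continue
--                 if d1 == d3:
--                     ok = cnt[d1] >= 3
--                 elif d1 == d2:
--                     ok = cnt[d1] >= 2 and cnt[d3] >= 1
--                 elif d2 == d3: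
--                     ok = cnt[d1] >= 1 and cnt[d2] >= 2
--                 else:
--                     ok = cnt[d1] >= 1 and cnt[d2] >= 1 and cnt[d3] >= 1
--                 if ok:
--                     return True
--     return False
-- ===== Notes on version B (the rewrite author's own statement) =====
-- stated objective: alternative
-- what changed: B replaces A's dict-based capping pass plus cubic scan over index triples of the reduced list by a one-pass digit frequency table and a constant scan over the 220 sorted digit triples (d1<=d2<=d3) with multiplicity-aware availability checks.
import Mathlib
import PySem

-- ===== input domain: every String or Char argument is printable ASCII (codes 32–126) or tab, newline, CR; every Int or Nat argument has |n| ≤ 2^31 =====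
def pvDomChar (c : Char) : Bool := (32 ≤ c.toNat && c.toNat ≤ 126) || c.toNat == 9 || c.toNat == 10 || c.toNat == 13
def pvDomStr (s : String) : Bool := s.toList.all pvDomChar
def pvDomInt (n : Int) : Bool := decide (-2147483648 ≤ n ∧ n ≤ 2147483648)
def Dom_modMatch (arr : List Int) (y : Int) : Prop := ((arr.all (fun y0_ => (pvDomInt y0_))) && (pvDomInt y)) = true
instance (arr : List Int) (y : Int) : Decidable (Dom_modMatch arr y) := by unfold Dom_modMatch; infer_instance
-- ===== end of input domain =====

-- B replaces A's cubic scan over index triples of the (capped) digit list by a digit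
-- frequency table and a scan over the 220 sorted digit triples (alternative decomposition).

-- ===== PORT A =====
def modMatch (arr : List Int) (y : Int) : Bool :=
  let arr2 := arr.map (fun a => PySem.Int.mod a 10)
  let st := arr2.foldl
    (fun (st : PySem.Dict Int Int × List Int) num =>
      if st.1.getD num 0 < 3 then
        (st.1.insert num (st.1.getD num 0 + 1), st.2 ++ [num])
      else st)
    (PySem.Dict.empty, [])
  let reduced := st.2
  let n : Int := reduced.length
  (PySem.List.pyRange 0 n 1).any fun i =>
    (PySem.List.pyRange (i + 1) n 1).any fun j =>
      (PySem.List.pyRange (j + 1) n 1).any fun k =>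
        PySem.Int.mod
          (PySem.List.pyGetD reduced i 0 * PySem.List.pyGetD reduced j 0 *
            PySem.List.pyGetD reduced k 0) 10 == y

-- ===== PORT B =====
def modMatch_alt (arr : List Int) (y : Int) : Bool :=
  let digits := arr.map (fun a => PySem.Int.mod a 10)
  let cnt := (PySem.List.pyRange 0 10 1).map
    (fun d => ((PySem.List.count digits d : Nat) : Int))
  (PySem.List.pyRange 0 10 1).any fun d1 =>
    (PySem.List.pyRange d1 10 1).any fun d2 =>
      (PySem.List.pyRange d2 10 1).any fun d3 =>
        if PySem.Int.mod (d1 * d2 * d3) 10 ≠ y then false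
        else
          if d1 == d3 then decide (3 ≤ PySem.List.pyGetD cnt d1 0)
          else if d1 == d2 then
            decide (2 ≤ PySem.List.pyGetD cnt d1 0) && decide (1 ≤ PySem.List.pyGetD cnt d3 0)
          else if d2 == d3 then
            decide (1 ≤ PySem.List.pyGetD cnt d1 0) && decide (2 ≤ PySem.List.pyGetD cnt d2 0)
          else
            decide (1 ≤ PySem.List.pyGetD cnt d1 0) && decide (1 ≤ PySem.List.pyGetD cnt d2 0) &&
              decide (1 ≤ PySem.List.pyGetD cnt d3 0)

-- ===== PRECONDITION & SPEC =====
def Spec_modMatch (arr : List Int) (y : Int) (out : Bool) : Prop := out = modMatch_alt arr y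
instance (arr : List Int) (y : Int) (out : Bool) : Decidable (Spec_modMatch arr y out) := by unfold Spec_modMatch; infer_instance

-- ===== CLAIM (what is proved, stated in full; the proofs are below) =====
def Claim_equal_modMatch : Prop := ∀ (arr : List Int) (y : Int), Dom_modMatch arr y → Spec_modMatch arr y (modMatch arr y)

-- ===== LEMMAS AND PROOFS =====

-- the common digit list
def pvDigits (arr : List Int) : List Int := arr.map (fun a => PySem.Int.mod a 10)

-- A's capping fold step and its reduced list
def pvStep (st : PySem.Dict Int Int × List Int) (num : Int) : PySem.Dict Int Int × List Int :=
  if st.1.getD num 0 < 3 then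
    (st.1.insert num (st.1.getD num 0 + 1), st.2 ++ [num])
  else st

def pvR (arr : List Int) : List Int :=
  ((pvDigits arr).foldl pvStep (PySem.Dict.empty, [])).2

theorem pv_fold_count (xs : List Int) : ∀ (f : PySem.Dict Int Int) (l : List Int),
    (∀ v, f.getD v 0 = (l.count v : Int)) → (∀ v, l.count v ≤ 3) →
    ∀ v, ((xs.foldl pvStep (f, l)).2).count v = min (l.count v + xs.count v) 3 := by
  induction xs with
  | nil =>
    intro f l hf hl v
    have := hl v
    simp [List.count_nil]
    omega
  | cons x xs ih =>
    intro f l hf hl v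
    rw [List.foldl_cons]
    have hstep : pvStep (f, l) x =
        if (l.count x : Int) < 3 then (f.insert x ((l.count x : Int) + 1), l ++ [x]) else (f, l) := by
      simp [pvStep, hf x]
    rw [hstep]
    by_cases h : l.count x < 3
    · rw [if_pos (by exact_mod_cast h)]
      have hf' : ∀ w, ((f.insert x ((l.count x : Int) + 1)).getD w 0) = (((l ++ [x]).count w : Int)) := by
        intro w
        rw [PySem.Dict.getD_insert]
        by_cases hw : w = x
        · subst hw; simp [List.count_append]
        · simp [hw, hf w, List.count_append, List.count_singleton, Ne.symm hw]
      have hl' : ∀ w, (l ++ [x]).count w ≤ 3 := by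
        intro w
        by_cases hw : w = x
        · subst hw; simp [List.count_append]; omega
        · simp [List.count_append, List.count_singleton, Ne.symm hw]; exact hl w
      rw [ih _ _ hf' hl' v]
      by_cases hv : x = v
      · subst hv; simp [List.count_append, List.count_cons]; omega
      · simp [List.count_append, List.count_singleton, List.count_cons, hv]
    · rw [if_neg (by exact_mod_cast h)]
      
      rw [ih _ _ hf hl v]
      by_cases hv : x = v
      · subst hv
        have := hl x
        simp [List.count_cons]
        omega
      · simp [List.count_cons, hv]

theorem pvR_count (arr : List Int) (v : Int) :
    (pvR arr).count v = min ((pvDigits arr).count v) 3 := by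
  unfold pvR
  rw [pv_fold_count (pvDigits arr) PySem.Dict.empty [] (by simp) (by simp) v]
  simp

theorem pv_digits_mem {arr : List Int} {v : Int} (h : v ∈ pvDigits arr) : 0 ≤ v ∧ v < 10 := by
  unfold pvDigits at h
  rcases List.mem_map.mp h with ⟨a, _, rfl⟩
  exact ⟨PySem.Int.mod_nonneg a (by norm_num), PySem.Int.mod_lt a (by norm_num)⟩

theorem pvR_mem {arr : List Int} {v : Int} (h : v ∈ pvR arr) : 0 ≤ v ∧ v < 10 := by
  have h1 : 0 < (pvR arr).count v := List.count_pos_iff.mpr h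
  rw [pvR_count] at h1
  have h2 : 0 < (pvDigits arr).count v := by omega
  exact pv_digits_mem (List.count_pos_iff.mp h2)

theorem pv_sort3 (a b c : Int) :
    ∃ x y z : Int, x ≤ y ∧ y ≤ z ∧ ([x, y, z] : List Int).Perm [a, b, c] := by
  rcases le_total a b with hab | hab
  · rcases le_total b c with hbc | hbc
    · exact ⟨a, b, c, hab, hbc, .refl _⟩
    · rcases le_total a c with hac | hac
      · exact ⟨a, c, b, hac, hbc, .cons a (.swap b c [])⟩
      · exact ⟨c, a, b, hac, hab, (List.Perm.swap a c [b]).trans (.cons a (.swap b c []))⟩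
  · rcases le_total a c with hac | hac
    · exact ⟨b, a, c, hab, hac, .swap a b [c]⟩
    · rcases le_total b c with hbc | hbc
      · exact ⟨b, c, a, hbc, hac, (List.Perm.cons b (.swap a c [])).trans (.swap a b [c])⟩
      · exact ⟨c, b, a, hbc, hab,
          ((List.Perm.swap b c [a]).trans (List.Perm.cons b (.swap a c []))).trans (.swap a b [c])⟩

theorem pv_prod3 {x y z a b c : Int} (h : ([x, y, z] : List Int).Perm [a, b, c]) :
    x * y * z = a * b * c := by
  have := h.prod_eq
  simpa [mul_assoc] using this

set_option maxRecDepth 4096 in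
theorem pv_thresh (x y z : Int) (D : List Int) (hxy : x ≤ y) (hyz : y ≤ z) :
    ((if x = z then (3 : Int) ≤ (D.count x : Int) else
      if x = y then ((2 : Int) ≤ (D.count x : Int) ∧ (1 : Int) ≤ (D.count z : Int)) else
      if y = z then ((1 : Int) ≤ (D.count x : Int) ∧ (2 : Int) ≤ (D.count y : Int)) else
      ((1 : Int) ≤ (D.count x : Int) ∧ (1 : Int) ≤ (D.count y : Int) ∧ (1 : Int) ≤ (D.count z : Int))))
    ↔ ∀ v : Int, List.count v [x, y, z] ≤ min (D.count v) 3 := by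
  constructor
  · intro h v
    by_cases e1 : x = y <;> by_cases e2 : y = z <;> by_cases e3 : x = z <;>
      by_cases hvx : x = v <;> by_cases hvy : y = v <;> by_cases hvz : z = v <;>
      (try split_ifs at *) <;> simp_all [List.count_cons] <;> omega
  · intro h
    have hx := h x
    have hy := h y
    have hz := h z
    by_cases e1 : x = y <;> by_cases e2 : y = z <;> by_cases e3 : x = z <;>
      (try split_ifs at *) <;> simp_all [List.count_cons] <;>
      (first
        | omega
        | (rcases eq_or_ne z x with e4 | e4 <;> simp_all <;> omega))

theorem pv_A_char (arr : List Int) (t : Int) :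
    modMatch arr t = true ↔
      ∃ a b c : Int, ([a, b, c] : List Int).Sublist (pvR arr) ∧
        PySem.Int.mod (a * b * c) 10 = t := by
  have hR : modMatch arr t =
      ((PySem.List.pyRange 0 ((pvR arr).length : Int) 1).any fun i =>
        (PySem.List.pyRange (i + 1) ((pvR arr).length : Int) 1).any fun j =>
          (PySem.List.pyRange (j + 1) ((pvR arr).length : Int) 1).any fun k =>
            PySem.Int.mod
              (PySem.List.pyGetD (pvR arr) i 0 * PySem.List.pyGetD (pvR arr) j 0 *
                PySem.List.pyGetD (pvR arr) k 0) 10 == t) := rfl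
  rw [hR]
  simp only [List.any_eq_true, PySem.List.mem_pyRange_one, beq_iff_eq]
  constructor
  · rintro ⟨i, ⟨hi0, hin⟩, j, ⟨hij, hjn⟩, k, ⟨hjk, hkn⟩, hmod⟩
    have hiN : i.toNat < (pvR arr).length := by omega
    have hjN : j.toNat < (pvR arr).length := by omega
    have hkN : k.toNat < (pvR arr).length := by omega
    refine ⟨(pvR arr)[i.toNat], (pvR arr)[j.toNat], (pvR arr)[k.toNat], ?_, ?_⟩
    · have hpw : List.Pairwise (fun x1 x2 => x1 < x2)
          ([⟨i.toNat, hiN⟩, ⟨j.toNat, hjN⟩, ⟨k.toNat, hkN⟩] : List (Fin (pvR arr).length)) := by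
        refine List.Pairwise.cons ?_ (List.Pairwise.cons ?_ (List.pairwise_singleton _ _))
        · intro x hx
          rcases List.mem_cons.mp hx with hx | hx
          · subst hx; exact Fin.mk_lt_mk.mpr (by omega)
          · rcases List.mem_singleton.mp hx with rfl
            exact Fin.mk_lt_mk.mpr (by omega)
        · intro x hx
          rcases List.mem_singleton.mp hx with rfl
          exact Fin.mk_lt_mk.mpr (by omega)
      have := List.map_getElem_sublist hpw
      simpa using this
    · rw [PySem.List.pyGetD_eq_getElem _ 0 hi0 hin, PySem.List.pyGetD_eq_getElem _ 0 (by omega) hjn,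
        PySem.List.pyGetD_eq_getElem _ 0 (by omega) hkn] at hmod
      exact hmod
  · rintro ⟨a, b, c, hsub, hmod⟩
    obtain ⟨is, hmap, hpw⟩ := List.sublist_eq_map_getElem hsub
    have hlen : is.length = 3 := by
      have := congrArg List.length hmap
      simpa using this.symm
    obtain ⟨i, j, k, rfl⟩ := List.length_eq_three.mp hlen
    simp only [List.map_cons, List.map_nil, List.cons.injEq, and_true] at hmap
    obtain ⟨ha, hb, hc⟩ := hmap
    simp only [List.pairwise_cons, List.mem_cons, List.mem_singleton] at hpw
    refine ⟨(i : Int), ⟨by omega, by exact_mod_cast i.isLt⟩,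
            (j : Int), ⟨?_, by exact_mod_cast j.isLt⟩,
            (k : Int), ⟨?_, by exact_mod_cast k.isLt⟩, ?_⟩
    · have : i.val < j.val := hpw.1 j (Or.inl rfl)
      omega
    · have : j.val < k.val := hpw.2.1 k (Or.inl rfl)
      omega
    · rw [PySem.List.pyGetD_eq_getElem _ 0 (by omega) (by exact_mod_cast i.isLt),
          PySem.List.pyGetD_eq_getElem _ 0 (by omega) (by exact_mod_cast j.isLt),
          PySem.List.pyGetD_eq_getElem _ 0 (by omega) (by exact_mod_cast k.isLt)]
      simp only [Int.toNat_natCast]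
      simp only [Fin.getElem_fin] at ha hb hc
      rw [← ha, ← hb, ← hc]
      exact hmod

theorem pv_if_false_else {P : Prop} [Decidable P] {b : Bool} :
    ((if P then false else b) = true) ↔ (¬ P ∧ b = true) := by
  split_ifs with h <;> simp [h]

theorem pv_cnt_lookup (D : List Int) {d : Int} (h0 : 0 ≤ d) (h1 : d < 10) :
    PySem.List.pyGetD
      ((PySem.List.pyRange 0 10 1).map
        (fun d => ((PySem.List.count D d : Nat) : Int))) d 0
      = (D.count d : Int) := by
  rw [PySem.List.pyGetD_map_pyRange_of_nonneg _ 10 d 0 h0 h1, PySem.List.count_eq]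

theorem pv_B_char (arr : List Int) (t : Int) :
    modMatch_alt arr t = true ↔
      ∃ x y z : Int, 0 ≤ x ∧ x ≤ y ∧ y ≤ z ∧ z < 10 ∧
        PySem.Int.mod (x * y * z) 10 = t ∧
        (∀ v : Int, List.count v [x, y, z] ≤ min ((pvDigits arr).count v) 3) := by
  have hB : modMatch_alt arr t =
      ((PySem.List.pyRange 0 10 1).any fun d1 =>
        (PySem.List.pyRange d1 10 1).any fun d2 =>
          (PySem.List.pyRange d2 10 1).any fun d3 =>
            if PySem.Int.mod (d1 * d2 * d3) 10 ≠ t then false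
            else
              if d1 == d3 then
                decide (3 ≤ ((pvDigits arr).count d1 : Int))
              else if d1 == d2 then
                decide (2 ≤ ((pvDigits arr).count d1 : Int)) && decide (1 ≤ ((pvDigits arr).count d3 : Int))
              else if d2 == d3 then
                decide (1 ≤ ((pvDigits arr).count d1 : Int)) && decide (2 ≤ ((pvDigits arr).count d2 : Int))
              else
                decide (1 ≤ ((pvDigits arr).count d1 : Int)) && decide (1 ≤ ((pvDigits arr).count d2 : Int)) &&
                  decide (1 ≤ ((pvDigits arr).count d3 : Int))) := by
    unfold modMatch_alt
    refine PySem.List.any_congr_mem ?_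
    intro d1 hd1
    have h1 := PySem.List.mem_pyRange_one.mp hd1
    refine PySem.List.any_congr_mem ?_
    intro d2 hd2
    have h2 := PySem.List.mem_pyRange_one.mp hd2
    refine PySem.List.any_congr_mem ?_
    intro d3 hd3
    have h3 := PySem.List.mem_pyRange_one.mp hd3
    rw [pv_cnt_lookup _ (d := d1) (by omega) (by omega), pv_cnt_lookup _ (d := d2) (by omega) (by omega),
        pv_cnt_lookup _ (d := d3) (by omega) (by omega)]
    rfl
  rw [hB]
  simp only [List.any_eq_true, PySem.List.mem_pyRange_one, pv_if_false_else, not_not,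
    Bool.and_eq_true, decide_eq_true_iff, beq_iff_eq]
  constructor
  · rintro ⟨d1, ⟨h1a, h1b⟩, d2, ⟨h2a, h2b⟩, d3, ⟨h3a, h3b⟩, hmod, hth⟩
    refine ⟨d1, d2, d3, h1a, h2a, h3a, h3b, hmod,
      (pv_thresh d1 d2 d3 (pvDigits arr) h2a h3a).mp ?_⟩
    split_ifs at hth ⊢ <;> simp only [Bool.and_eq_true, decide_eq_true_iff] at hth <;> tauto
  · rintro ⟨x, y, z, h0, hxy, hyz, hz, hmod, hcnt⟩
    have hth := (pv_thresh x y z (pvDigits arr) hxy hyz).mpr hcnt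
    refine ⟨x, ⟨h0, by omega⟩, y, ⟨hxy, by omega⟩, z, ⟨hyz, hz⟩, hmod, ?_⟩
    split_ifs at hth ⊢ <;> simp only [Bool.and_eq_true, decide_eq_true_iff] <;> tauto

theorem pv_main (arr : List Int) (t : Int) : modMatch arr t = modMatch_alt arr t := by
  rw [Bool.eq_iff_iff, pv_A_char, pv_B_char]
  constructor
  · rintro ⟨a, b, c, hsub, hmod⟩
    obtain ⟨x, y, z, hxy, hyz, hperm⟩ := pv_sort3 a b c
    have hsp : List.Subperm [x, y, z] (pvR arr) := hperm.subperm.trans hsub.subperm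
    have hx0 : 0 ≤ x := (pvR_mem (hsp.subset (by simp))).1
    have hz10 : z < 10 := (pvR_mem (hsp.subset (by simp))).2
    refine ⟨x, y, z, hx0, hxy, hyz, hz10, by rw [pv_prod3 hperm]; exact hmod, ?_⟩
    intro v
    rw [← pvR_count]
    by_cases hv : v ∈ ([x, y, z] : List Int)
    · exact List.subperm_ext_iff.mp hsp v hv
    · simp [List.count_eq_zero_of_not_mem hv]
  · rintro ⟨x, y, z, _, _, _, _, hmod, hcnt⟩
    have hsp : List.Subperm [x, y, z] (pvR arr) :=
      List.subperm_ext_iff.mpr (fun v hv => by rw [pvR_count]; exact hcnt v)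
    obtain ⟨l, hperm, hsub⟩ := hsp
    have hlen : l.length = 3 := by simpa using hperm.length_eq
    obtain ⟨a, b, c, rfl⟩ := List.length_eq_three.mp hlen
    exact ⟨a, b, c, hsub, by rw [pv_prod3 hperm]; exact hmod⟩

-- ===== VERDICT (by name: the statement is the Claim_ definition above) =====
theorem modMatch_spec : Claim_equal_modMatch := by
  intro arr y _
  unfold Spec_modMatch
  exact pv_main arr y
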